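-- pv_equiv track=rewrite | github.com/sveraniko/CycleSync | app/application/reminders/adherence.py | compute_consecutive_negative_windows
-- ===== SOURCE A (Python) =====
-- NEGATIVE_ACTIONS = {"skip", "expired"}
--
-- def compute_consecutive_negative_windows(actions_desc: list[str]) -> tuple[int, int]:
--     consecutive_negative = 0
--     consecutive_expired = 0
--     for action in actions_desc:
--         if action == "snooze":
--             continue
--         if action in NEGATIVE_ACTIONS:
--             consecutive_negative += 1
--             if action == "expired":
--                 consecutive_expired += 1
--             else:
--                 consecutive_expired = 0
--             continue
--         break
--     return consecutive_negative, consecutive_expired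
-- ===== SOURCE B (Python) =====
-- from itertools import takewhile
--
-- def compute_consecutive_negative_windows(actions_desc: list[str]) -> tuple[int, int]:
--     window = list(takewhile(lambda a: a in ("snooze", "skip", "expired"), actions_desc))
--     stripped = [a for a in window if a != "snooze"]
--     trailing_expired = len(list(takewhile(lambda a: a == "expired", reversed(stripped))))
--     return len(stripped), trailing_expired
-- ===== Notes on version B (the rewrite author's own statement) =====
-- stated objective: simpler
-- what changed: Replaces the stateful loop with two accumulators and reset-on-skip by a declarative pipeline: take the leading negative/snooze window, strip snoozes, return its length and its trailing-'expired' run length.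
import Mathlib
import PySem

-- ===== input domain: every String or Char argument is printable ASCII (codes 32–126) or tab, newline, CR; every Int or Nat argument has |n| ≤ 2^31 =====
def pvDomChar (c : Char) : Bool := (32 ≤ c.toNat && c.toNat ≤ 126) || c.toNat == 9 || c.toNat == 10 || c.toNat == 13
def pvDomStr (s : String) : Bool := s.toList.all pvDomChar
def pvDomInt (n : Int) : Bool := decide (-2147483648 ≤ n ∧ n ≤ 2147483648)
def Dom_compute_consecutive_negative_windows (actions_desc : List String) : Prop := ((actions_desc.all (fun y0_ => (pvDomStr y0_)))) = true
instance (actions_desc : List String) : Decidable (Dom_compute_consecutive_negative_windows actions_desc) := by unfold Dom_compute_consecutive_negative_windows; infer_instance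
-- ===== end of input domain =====

-- B replaces A's stateful loop (two accumulators, reset-on-skip) by a declarative
-- pipeline: leading window via takeWhile, strip snoozes, length + trailing-"expired"
-- run length. Objective: simpler.


-- ===== PORT A =====
-- NEGATIVE_ACTIONS = {"skip", "expired"} (a Python set of string literals)
def pvNegativeActions : PySem.Set String := PySem.Set.ofList ["skip", "expired"]

-- the for-loop with `continue`/`break`, carrying the two accumulators
def pvLoopA : List String → Int → Int → Int × Int
  | [], consecutive_negative, consecutive_expired => (consecutive_negative, consecutive_expired)
  | action :: rest, consecutive_negative, consecutive_expired =>
    if action = "snooze" then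
      pvLoopA rest consecutive_negative consecutive_expired
    else if action ∈ pvNegativeActions then
      pvLoopA rest (consecutive_negative + 1)
        (if action = "expired" then consecutive_expired + 1 else 0)
    else
      (consecutive_negative, consecutive_expired)

def compute_consecutive_negative_windows (actions_desc : List String) : Int × Int :=
  pvLoopA actions_desc 0 0

-- ===== PORT B =====
def compute_consecutive_negative_windows_alt (actions_desc : List String) : Int × Int :=
  let window := actions_desc.takeWhile (fun a => a ∈ (["snooze", "skip", "expired"] : List String))
  let stripped := window.filter (fun a => a ≠ "snooze")
  let trailing_expired := (stripped.reverse.takeWhile (fun a => a = "expired")).length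
  ((stripped.length : Int), (trailing_expired : Int))

-- ===== PRECONDITION & SPEC =====
def Spec_compute_consecutive_negative_windows (actions_desc : List String) (out : Int × Int) : Prop := out = compute_consecutive_negative_windows_alt actions_desc
instance (actions_desc : List String) (out : Int × Int) : Decidable (Spec_compute_consecutive_negative_windows actions_desc out) := by unfold Spec_compute_consecutive_negative_windows; infer_instance

-- ===== CLAIM (what is proved, stated in full; the proofs are below) =====
def Claim_equal_compute_consecutive_negative_windows : Prop := ∀ (actions_desc : List String), Dom_compute_consecutive_negative_windows actions_desc → Spec_compute_consecutive_negative_windows actions_desc (compute_consecutive_negative_windows actions_desc)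

-- ===== LEMMAS AND PROOFS =====

-- the snooze-stripped leading window that B computes
def pvStripped (xs : List String) : List String :=
  (xs.takeWhile (fun a => a ∈ (["snooze", "skip", "expired"] : List String))).filter
    (fun a => a ≠ "snooze")

-- the trailing-"expired" run length of a list
def pvTrail (T : List String) : Nat :=
  (T.reverse.takeWhile (fun a => a = "expired")).length

theorem pvTrail_cons_ne (x : String) (T : List String) (h : x ≠ "expired") :
    pvTrail (x :: T) = pvTrail T := by
  unfold pvTrail
  simp only [List.reverse_cons, List.takeWhile_append]
  split_ifs with hc
  · have heq : T.reverse.takeWhile (fun a => decide (a = "expired")) = T.reverse :=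
      (List.takeWhile_prefix _).eq_of_length hc
    simp [heq, h, ← hc]
  · simp

theorem pvTrail_cons_all (T : List String) (h : ∀ y ∈ T, y = "expired") :
    pvTrail ("expired" :: T) = T.length + 1 := by
  unfold pvTrail
  have hall : ∀ y ∈ T.reverse, (fun a => decide (a = "expired")) y = true := by
    intro y hy; simp [h y (List.mem_reverse.mp hy)]
  simp [List.takeWhile_append, List.takeWhile_eq_self_iff.mpr hall]

theorem pvTrail_cons_not_all (x : String) (T : List String)
    (h : ∃ y ∈ T, y ≠ "expired") : pvTrail (x :: T) = pvTrail T := by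
  unfold pvTrail
  simp only [List.reverse_cons, List.takeWhile_append]
  split_ifs with hc
  · exfalso
    obtain ⟨y, hy, hne⟩ := h
    have heq : T.reverse.takeWhile (fun a => decide (a = "expired")) = T.reverse :=
      (List.takeWhile_prefix _).eq_of_length hc
    have := List.takeWhile_eq_self_iff.mp heq y (List.mem_reverse.mpr hy)
    simp at this; exact hne this
  · simp

theorem pvStripped_mem (xs : List String) :
    ∀ y ∈ pvStripped xs, y = "skip" ∨ y = "expired" := by
  intro y hy
  unfold pvStripped at hy
  have h1 := List.mem_of_mem_filter hy
  have h2 := List.mem_takeWhile_imp h1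
  have h3 := List.of_mem_filter hy
  simp at h2 h3
  rcases h2 with h | h | h
  · exact absurd h h3
  · exact Or.inl h
  · exact Or.inr h

theorem pvLoopA_eq (xs : List String) (n e : Int) :
    pvLoopA xs n e =
      (n + (pvStripped xs).length,
       (if "skip" ∈ pvStripped xs then 0 else e) + (pvTrail (pvStripped xs) : Int)) := by
  induction xs generalizing n e with
  | nil => simp [pvLoopA, pvStripped, pvTrail]
  | cons a rest ih =>
    by_cases hs : a = "snooze"
    · have hstr : pvStripped (a :: rest) = pvStripped rest := by
        simp [pvStripped, hs]
      rw [show pvLoopA (a :: rest) n e = pvLoopA rest n e by simp [pvLoopA, hs], hstr, ih]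
    · by_cases hk : a = "skip"
      · have hstr : pvStripped (a :: rest) = "skip" :: pvStripped rest := by
          simp [pvStripped, hk]
        have hloop : pvLoopA (a :: rest) n e = pvLoopA rest (n + 1) 0 := by
          simp [pvLoopA, hk, pvNegativeActions, PySem.Set.ofList]
        rw [hloop, ih, hstr]
        have htr : pvTrail ("skip" :: pvStripped rest) = pvTrail (pvStripped rest) :=
          pvTrail_cons_ne _ _ (by decide)
        rw [htr]
        refine Prod.ext ?_ ?_
        · simp; ring
        · simp
      · by_cases he : a = "expired"
        · have hstr : pvStripped (a :: rest) = "expired" :: pvStripped rest := by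
            simp [pvStripped, he]
          have hloop : pvLoopA (a :: rest) n e = pvLoopA rest (n + 1) (e + 1) := by
            simp [pvLoopA, he, pvNegativeActions, PySem.Set.ofList]
          rw [hloop, ih, hstr]
          refine Prod.ext ?_ ?_
          · simp; ring
          · simp only
            by_cases hsk : "skip" ∈ pvStripped rest
            · have hne : ∃ y ∈ pvStripped rest, y ≠ "expired" :=
                ⟨"skip", hsk, by decide⟩
              rw [pvTrail_cons_not_all _ _ hne]
              simp [hsk]
            · have hall : ∀ y ∈ pvStripped rest, y = "expired" := by
                intro y hy
                rcases pvStripped_mem rest y hy with h | h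
                · exact absurd (h ▸ hy) hsk
                · exact h
              rw [pvTrail_cons_all _ hall]
              have : pvTrail (pvStripped rest) = (pvStripped rest).length := by
                unfold pvTrail
                have hall' : ∀ y ∈ (pvStripped rest).reverse,
                    (fun a => decide (a = "expired")) y = true := by
                  intro y hy; simp [hall y (List.mem_reverse.mp hy)]
                simp [List.takeWhile_eq_self_iff.mpr hall']
              simp [hsk, this]
              ring
        · have hstr : pvStripped (a :: rest) = [] := by
            simp [pvStripped, hs, hk, he]
          have hloop : pvLoopA (a :: rest) n e = (n, e) := by
            simp [pvLoopA, hs, hk, he, pvNegativeActions, PySem.Set.ofList]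
          rw [hloop, hstr]
          simp [pvTrail]

-- ===== VERDICT (by name: the statement is the Claim_ definition above) =====
theorem compute_consecutive_negative_windows_spec : Claim_equal_compute_consecutive_negative_windows := by
  intro actions_desc _
  unfold Spec_compute_consecutive_negative_windows
  unfold compute_consecutive_negative_windows compute_consecutive_negative_windows_alt
  rw [pvLoopA_eq]
  split_ifs <;> simp [pvStripped, pvTrail]
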